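-- pv_equiv track=rewrite | github.com/sun-hainan/Python | 编码理论/bch_code.py | encode_bch_15_7
-- ===== SOURCE A (Python) =====
-- from typing import List, Tuple, Optional
--
-- def encode_bch_15_7(data: int) -> int:
--
--     """
--
--     (15, 7) BCH码编码
--
--
--
--     Args:
--
--         data: 7位数据
--
--
--
--     Returns:
--
--         15位码字
--
--     """
--
--     if data < 0 or data >= 128:
--
--         raise ValueError("数据必须是7位")
--
--
--
--     # 生成多项式 g(x) = x^8 + x^7 + x^6 + x^4 + 1
--
--     generator = [1, 0, 0, 1, 1, 0, 1, 0, 1]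
--
--
--
--     # 信息多项式系数
--
--     info_bits = [(data >> i) & 1 for i in range(7)]
--
--
--
--     # 乘以x^8
--
--     padded = info_bits + [0] * 8
--
--
--
--     # 除以g(x)
--
--     remainder = polynomial_divide(padded, generator)
--
--
--
--     # 码字
--
--     code = info_bits + remainder
--
--
--
--     return sum(code[i] << i for i in range(15))
--
-- def polynomial_divide(dividend: List[int], divisor: List[int]) -> List[int]:
--
--     """多项式除法"""
--
--     dividend = dividend.copy()
--
--     divisor_degree = len(divisor) - 1
--
--
--
--     for i in range(len(dividend) - divisor_degree):
--
--         if dividend[i]: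
--
--             for j in range(1, len(divisor)):
--
--                 dividend[i + j] ^= divisor[j]
--
--
--
--     return dividend[len(dividend) - divisor_degree:]
-- ===== SOURCE B (Python) =====
-- # BCH(15,7) is linear: the codeword of data is the XOR of the generator-matrix
-- # rows (the codewords of the 7 unit information words), selected by data's bits.
-- _G_ROWS = [7681, 15362, 30724, 23688, 5520, 11040, 22080]
--
-- def encode_bch_15_7(data: int) -> int:
--     if data < 0 or data >= 128:
--         raise ValueError("数据必须是7位")
--     code = 0
--     for i, row in enumerate(_G_ROWS):
--         if (data >> i) & 1:
--             code ^= row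
--     return code
-- ===== Notes on version B (the rewrite author's own statement) =====
-- stated objective: alternative
-- what changed: Replaced polynomial long division by the generator polynomial with a generator-matrix encoding: the code is linear, so B XORs precomputed basis codewords (codewords of the 7 unit information words) selected by data's bits, with no division at all.
import Mathlib
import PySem

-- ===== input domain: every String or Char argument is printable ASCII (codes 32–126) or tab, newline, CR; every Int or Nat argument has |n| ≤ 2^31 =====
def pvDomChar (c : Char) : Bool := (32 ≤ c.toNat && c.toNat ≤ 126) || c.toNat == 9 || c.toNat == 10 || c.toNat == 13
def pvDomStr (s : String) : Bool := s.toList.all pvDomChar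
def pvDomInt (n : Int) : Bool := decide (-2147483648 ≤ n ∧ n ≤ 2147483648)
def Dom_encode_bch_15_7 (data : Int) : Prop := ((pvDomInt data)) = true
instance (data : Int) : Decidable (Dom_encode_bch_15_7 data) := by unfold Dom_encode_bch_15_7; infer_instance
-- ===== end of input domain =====

-- One honest line: B replaces A's polynomial long division by a generator-matrix
-- encoding (XOR of precomputed basis codewords selected by data's bits); same
-- values on 0 ≤ data < 128, A raises ValueError outside (excluded by Pre_).

-- ===== PORT A =====
-- literal port of polynomial_divide: nested index loops mutating the dividend list
def polynomial_divide (dividend divisor : List Nat) : List Nat :=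
  let dd := divisor.length - 1
  let final := (List.range (dividend.length - dd)).foldl (fun dv i =>
    if dv.getD i 0 ≠ 0 then
      (List.range (divisor.length - 1)).foldl (fun dv' j0 =>
        let j := j0 + 1
        dv'.set (i + j) (((dv'.getD (i + j) 0) ^^^ (divisor.getD j 0) : Nat))) dv
    else dv) dividend
  final.drop (final.length - dd)

def encode_bch_15_7 (data : Int) : Int :=
  if data < 0 ∨ data ≥ 128 then 0  -- Python raises ValueError here; excluded by Pre_
  else
    -- data ≥ 0 here, so Python's int bitwise ops are exact as Nat bitwise ops on data.toNat
    let generator : List Nat := [1, 0, 0, 1, 1, 0, 1, 0, 1]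
    let info_bits := (List.range 7).map (fun (i : Nat) => (data.toNat >>> i) &&& 1)
    let padded := info_bits ++ List.replicate 8 0
    let remainder := polynomial_divide padded generator
    let code := info_bits ++ remainder
    Int.ofNat ((List.range 15).foldl (fun (s : Nat) (i : Nat) => s + ((code.getD i 0) <<< i)) 0)

-- ===== PORT B =====
-- the generator-matrix rows: codewords of the 7 unit information words
def pvGRows : List Nat := [7681, 15362, 30724, 23688, 5520, 11040, 22080]

def encode_bch_15_7_alt (data : Int) : Int :=
  if data < 0 ∨ data ≥ 128 then 0  -- Python raises ValueError here; excluded by Pre_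
  else
    -- data ≥ 0 here, so Python's int bitwise ops are exact as Nat bitwise ops on data.toNat
    Int.ofNat ((PySem.List.enumerate pvGRows).foldl
      (fun (code : Nat) (p : Int × Nat) =>
        if (data.toNat >>> p.1.toNat) &&& 1 ≠ 0 then code ^^^ p.2 else code) 0)

-- ===== PRECONDITION & SPEC =====
-- Pre_ excludes exactly the inputs where A raises ValueError
def Pre_encode_bch_15_7 (data : Int) : Prop := 0 ≤ data ∧ data < 128
instance (data : Int) : Decidable (Pre_encode_bch_15_7 data) := by unfold Pre_encode_bch_15_7; infer_instance
def pvWitness_encode_bch_15_7 : Int := (42)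

def Spec_encode_bch_15_7 (data : Int) (out : Int) : Prop := out = encode_bch_15_7_alt data
instance (data : Int) (out : Int) : Decidable (Spec_encode_bch_15_7 data out) := by unfold Spec_encode_bch_15_7; infer_instance

-- ===== CLAIM =====
def Claim_equal_encode_bch_15_7 : Prop := ∀ (data : Int), Dom_encode_bch_15_7 data → Pre_encode_bch_15_7 data → Spec_encode_bch_15_7 data (encode_bch_15_7 data)

-- ===== LEMMAS AND PROOFS =====
lemma encode_bch_all128 :
    ((List.range 128).all (fun n =>
      encode_bch_15_7 (Int.ofNat n) == encode_bch_15_7_alt (Int.ofNat n))) = true := by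
  decide

-- ===== VERDICT =====
theorem encode_bch_15_7_spec : Claim_equal_encode_bch_15_7 := by
  intro data _ hpre
  obtain ⟨h0, h1⟩ := hpre
  unfold Spec_encode_bch_15_7
  have hn : data = Int.ofNat data.toNat := (Int.toNat_of_nonneg h0).symm
  have hlt : data.toNat < 128 := by omega
  have h := List.all_eq_true.mp encode_bch_all128 data.toNat (List.mem_range.mpr hlt)
  rw [hn]
  exact eq_of_beq h
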